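-- pv_equiv track=rewrite | github.com/paulharman/dnd-character-scraper | scraper/core/calculators/attack.py | _get_primary_spellcasting_ability
-- ===== SOURCE A (Python) =====
-- from typing import Dict, Any, List, Optional, Tuple
--
-- def _get_primary_spellcasting_ability(character_data: Dict[str, Any]) -> str:
--     """Get primary spellcasting ability."""
--     classes = character_data.get('classes', [])
--
--     # Simple mapping - would need more sophisticated logic for multiclass
--     for class_data in classes:
--         class_name = class_data.get('definition', {}).get('name', '').lower()
--
--         if 'cleric' in class_name or 'druid' in class_name or 'ranger' in class_name:
--             return 'wisdom'
--         elif 'sorcerer' in class_name or 'bard' in class_name or 'paladin' in class_name or 'warlock' in class_name: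
--             return 'charisma'
--         elif 'wizard' in class_name:
--             return 'intelligence'
--
--     return 'none'
-- ===== SOURCE B (Python) =====
-- _PRIORITY = {'cleric': 0, 'druid': 0, 'ranger': 0,
--              'sorcerer': 1, 'bard': 1, 'paladin': 1, 'warlock': 1,
--              'wizard': 2}
-- _ABILITIES = ['wisdom', 'charisma', 'intelligence']
--
-- def _get_primary_spellcasting_ability(character_data):
--     """Collect every (class index, keyword priority) hit across all classes,
--     then answer from the lexicographically smallest hit (no early return)."""
--     hits = [
--         (i, prio)
--         for i, class_data in enumerate(character_data.get('classes', []))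
--         for keyword, prio in _PRIORITY.items()
--         if keyword in class_data.get('definition', {}).get('name', '').lower()
--     ]
--     if not hits:
--         return 'none'
--     return _ABILITIES[min(hits)[1]]
-- ===== Notes on version B (the rewrite author's own statement) =====
-- stated objective: alternative
-- what changed: B abandons A's early-return if/elif scan: it exhaustively collects every (class index, keyword priority) hit with a comprehension over all classes and all keywords, then answers from the lexicographically smallest hit via min(), mapping its priority through an abilities list.
import Mathlib
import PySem

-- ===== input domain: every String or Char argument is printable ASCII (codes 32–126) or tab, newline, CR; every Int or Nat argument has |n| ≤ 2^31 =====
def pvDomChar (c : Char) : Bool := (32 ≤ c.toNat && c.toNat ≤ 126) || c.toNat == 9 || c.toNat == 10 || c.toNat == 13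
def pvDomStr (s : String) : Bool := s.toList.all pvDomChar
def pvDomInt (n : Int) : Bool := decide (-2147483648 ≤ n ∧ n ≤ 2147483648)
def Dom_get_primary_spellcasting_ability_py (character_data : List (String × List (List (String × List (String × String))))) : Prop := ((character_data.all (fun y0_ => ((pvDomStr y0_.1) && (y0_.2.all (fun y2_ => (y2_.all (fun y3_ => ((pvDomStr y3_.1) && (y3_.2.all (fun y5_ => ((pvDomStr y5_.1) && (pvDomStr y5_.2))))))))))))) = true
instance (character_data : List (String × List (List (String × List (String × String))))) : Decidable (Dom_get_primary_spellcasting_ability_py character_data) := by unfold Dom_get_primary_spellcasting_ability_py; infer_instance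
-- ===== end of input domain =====

-- B replaces A's early-return if/elif cascade by exhaustively collecting every (class index, keyword priority) hit and taking the lexicographic minimum (alternative algorithm, same cost).


-- ===== PORT A =====
def pvA_name (class_data : List (String × List (String × String))) : String :=
  PySem.Str.lower (PySem.Dict.getD (PySem.Dict.ofList ((PySem.Dict.ofList class_data).getD "definition" [])) "name" "")

def pvA_loop : List (List (String × List (String × String))) → String
  | [] => "none"
  | class_data :: rest =>
    let class_name := pvA_name class_data
    if PySem.Str.isIn "cleric" class_name || PySem.Str.isIn "druid" class_name || PySem.Str.isIn "ranger" class_name then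
      "wisdom"
    else if PySem.Str.isIn "sorcerer" class_name || PySem.Str.isIn "bard" class_name || PySem.Str.isIn "paladin" class_name || PySem.Str.isIn "warlock" class_name then
      "charisma"
    else if PySem.Str.isIn "wizard" class_name then
      "intelligence"
    else
      pvA_loop rest

def get_primary_spellcasting_ability_py (character_data : List (String × List (List (String × List (String × String))))) : String :=
  pvA_loop ((PySem.Dict.ofList character_data).getD "classes" [])

-- ===== PORT B =====
def pvPriority : List (String × Int) :=
  [("cleric", 0), ("druid", 0), ("ranger", 0),
   ("sorcerer", 1), ("bard", 1), ("paladin", 1), ("warlock", 1),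
   ("wizard", 2)]

def pvAbilities : List String := ["wisdom", "charisma", "intelligence"]

def pvB_name (class_data : List (String × List (String × String))) : String :=
  PySem.Str.lower (PySem.Dict.getD (PySem.Dict.ofList ((PySem.Dict.ofList class_data).getD "definition" [])) "name" "")

def pvB_classHits (i : Int) (class_data : List (String × List (String × String))) : List (Int × Int) :=
  pvPriority.filterMap (fun kp => if PySem.Str.isIn kp.1 (pvB_name class_data) then some (i, kp.2) else none)

def get_primary_spellcasting_ability_py_alt (character_data : List (String × List (List (String × List (String × String))))) : String :=
  let hits := (PySem.List.enumerate ((PySem.Dict.ofList character_data).getD "classes" [])).flatMap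
    (fun ic => pvB_classHits ic.1 ic.2)
  match PySem.List.min2? hits (fun h => h.1) (fun h => h.2) with
  | none => "none"
  | some m => PySem.List.pyGetD pvAbilities m.2 ""

-- ===== PRECONDITION & SPEC =====
def Spec_get_primary_spellcasting_ability_py (character_data : List (String × List (List (String × List (String × String))))) (out : String) : Prop := out = get_primary_spellcasting_ability_py_alt character_data
instance (character_data : List (String × List (List (String × List (String × String))))) (out : String) : Decidable (Spec_get_primary_spellcasting_ability_py character_data out) := by unfold Spec_get_primary_spellcasting_ability_py; infer_instance

-- ===== CLAIM (what is proved, stated in full; the proofs are below) =====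
def Claim_equal_get_primary_spellcasting_ability_py : Prop := ∀ (character_data : List (String × List (List (String × List (String × String))))), Dom_get_primary_spellcasting_ability_py character_data → Spec_get_primary_spellcasting_ability_py character_data (get_primary_spellcasting_ability_py character_data)

-- ===== LEMMAS AND PROOFS =====

-- the fold step of PySem.List.min2? at our keys
def pvStep (acc : Option (Int × Int)) (x : Int × Int) : Option (Int × Int) :=
  match acc with
  | none => some x
  | some m => if (decide (x.1 < m.1) || !decide (m.1 < x.1) && decide (x.2 < m.2)) = true then some x else some m

theorem pv_min2_eq_foldl (xs : List (Int × Int)) :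
    PySem.List.min2? xs (fun h => h.1) (fun h => h.2) = List.foldl pvStep none xs := by
  unfold PySem.List.min2? pvStep
  congr 1
  funext acc x
  cases acc <;> rfl

theorem pv_step_keep (m : Int × Int) (t : List (Int × Int))
    (h : ∀ x ∈ t, m.1 < x.1 ∨ (m.1 = x.1 ∧ m.2 ≤ x.2)) :
    List.foldl pvStep (some m) t = some m := by
  induction t with
  | nil => rfl
  | cons x t ih =>
    have hx := h x (by simp)
    have hstep : pvStep (some m) x = some m := by
      simp only [pvStep]
      rcases hx with h1 | ⟨h1, h2⟩ <;> (rw [if_neg]; simp; omega)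
    rw [List.foldl_cons, hstep]
    exact ih (fun y hy => h y (by simp [hy]))

theorem pv_case_hit (s p : Int) (t R : List (Int × Int))
    (ht : ∀ y ∈ t, y.1 = s ∧ p ≤ y.2) (hR : ∀ y ∈ R, s < y.1) :
    List.foldl pvStep none (((s, p) :: t) ++ R) = some (s, p) := by
  rw [List.cons_append, List.foldl_cons]
  have : pvStep none (s, p) = some (s, p) := rfl
  rw [this, List.foldl_append, pv_step_keep (s, p) t (fun y hy => Or.inr ⟨((ht y hy).1).symm, (ht y hy).2⟩),
      pv_step_keep (s, p) R (fun y hy => Or.inl (hR y hy))]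

theorem pv_mem_classHits {y : Int × Int} {i : Int} {cd : List (String × List (String × String))}
    (h : y ∈ pvB_classHits i cd) : y.1 = i ∧ 0 ≤ y.2 ∧ y.2 ≤ 2 := by
  simp only [pvB_classHits, pvPriority, List.mem_filterMap] at h
  obtain ⟨kp, hkp, hy⟩ := h
  split at hy
  · cases hy
    fin_cases hkp <;> simp
  · cases hy

theorem pv_mem_hitsFrom {y : Int × Int} (classes : List (List (String × List (String × String)))) (s : Int)
    (h : y ∈ (PySem.List.enumerate classes s).flatMap (fun ic => pvB_classHits ic.1 ic.2)) : s ≤ y.1 := by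
  simp only [List.mem_flatMap] at h
  obtain ⟨ic, hic, hy⟩ := h
  rw [PySem.List.mem_enumerate_iff] at hic
  obtain ⟨k, hk, rfl⟩ := hic
  have := (pv_mem_classHits hy).1
  omega

-- per-class hit list of keywords from position j of the table onward
theorem pv_mem_filterMap_suffix {y : Int × Int} {i : Int} {name : String} {tbl : List (String × Int)}
    (h : y ∈ tbl.filterMap (fun kp => if PySem.Str.isIn kp.1 name then some (i, kp.2) else none)) :
    y.1 = i ∧ y.2 ∈ tbl.map (fun kp => kp.2) := by
  simp only [List.mem_filterMap] at h
  obtain ⟨kp, hkp, hy⟩ := h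
  split at hy
  · cases hy; exact ⟨rfl, List.mem_map_of_mem hkp⟩
  · cases hy

theorem pv_main (classes : List (List (String × List (String × String)))) (s : Int) :
    pvA_loop classes =
      (match List.foldl pvStep none ((PySem.List.enumerate classes s).flatMap (fun ic => pvB_classHits ic.1 ic.2)) with
       | none => "none"
       | some m => PySem.List.pyGetD pvAbilities m.2 "") := by
  induction classes generalizing s with
  | nil => rfl
  | cons cd rest ih =>
    rw [PySem.List.enumerate_cons, List.flatMap_cons]
    have hR : ∀ y ∈ (PySem.List.enumerate rest (s + 1)).flatMap (fun ic => pvB_classHits ic.1 ic.2), s < y.1 := by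
      intro y hy
      have := pv_mem_hitsFrom rest (s + 1) hy
      omega
    have hname : pvA_name cd = pvB_name cd := rfl
    simp only [pvA_loop, hname]
    cases h1 : PySem.Str.isIn "cleric" (pvB_name cd) with
    | true =>
      have hH : pvB_classHits s cd = (s, (0 : Int)) :: (List.filterMap (fun kp => if PySem.Str.isIn kp.1 (pvB_name cd) then some (s, kp.2) else none) ([("druid", 0), ("ranger", 0), ("sorcerer", 1), ("bard", 1), ("paladin", 1), ("warlock", 1), ("wizard", 2)] : List (String × Int))) := by
        simp only [pvB_classHits, pvPriority, List.filterMap_cons, List.filterMap_nil, h1, reduceIte]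
      have ht : ∀ y ∈ List.filterMap (fun kp => if PySem.Str.isIn kp.1 (pvB_name cd) then some (s, kp.2) else none) ([("druid", 0), ("ranger", 0), ("sorcerer", 1), ("bard", 1), ("paladin", 1), ("warlock", 1), ("wizard", 2)] : List (String × Int)), y.1 = s ∧ (0 : Int) ≤ y.2 := by
        intro y hy
        have h := pv_mem_filterMap_suffix hy
        refine ⟨h.1, ?_⟩
        have h2 := h.2
        simp only [List.map_cons, List.map_nil, List.mem_cons, List.not_mem_nil, or_false] at h2
        omega
      rw [hH, pv_case_hit s 0 _ _ ht hR]
      simp only [Bool.true_or, reduceIte]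
      decide
    | false =>
      cases h2 : PySem.Str.isIn "druid" (pvB_name cd) with
      | true =>
        have hH : pvB_classHits s cd = (s, (0 : Int)) :: (List.filterMap (fun kp => if PySem.Str.isIn kp.1 (pvB_name cd) then some (s, kp.2) else none) ([("ranger", 0), ("sorcerer", 1), ("bard", 1), ("paladin", 1), ("warlock", 1), ("wizard", 2)] : List (String × Int))) := by
          simp only [pvB_classHits, pvPriority, List.filterMap_cons, List.filterMap_nil, h1, h2, reduceIte, Bool.false_eq_true]
        have ht : ∀ y ∈ List.filterMap (fun kp => if PySem.Str.isIn kp.1 (pvB_name cd) then some (s, kp.2) else none) ([("ranger", 0), ("sorcerer", 1), ("bard", 1), ("paladin", 1), ("warlock", 1), ("wizard", 2)] : List (String × Int)), y.1 = s ∧ (0 : Int) ≤ y.2 := by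
          intro y hy
          have h := pv_mem_filterMap_suffix hy
          refine ⟨h.1, ?_⟩
          have h2 := h.2
          simp only [List.map_cons, List.map_nil, List.mem_cons, List.not_mem_nil, or_false] at h2
          omega
        rw [hH, pv_case_hit s 0 _ _ ht hR]
        simp only [Bool.true_or, Bool.or_true, reduceIte]
        decide
      | false =>
        cases h3 : PySem.Str.isIn "ranger" (pvB_name cd) with
        | true =>
          have hH : pvB_classHits s cd = (s, (0 : Int)) :: (List.filterMap (fun kp => if PySem.Str.isIn kp.1 (pvB_name cd) then some (s, kp.2) else none) ([("sorcerer", 1), ("bard", 1), ("paladin", 1), ("warlock", 1), ("wizard", 2)] : List (String × Int))) := by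
            simp only [pvB_classHits, pvPriority, List.filterMap_cons, List.filterMap_nil, h1, h2, h3, reduceIte, Bool.false_eq_true]
          have ht : ∀ y ∈ List.filterMap (fun kp => if PySem.Str.isIn kp.1 (pvB_name cd) then some (s, kp.2) else none) ([("sorcerer", 1), ("bard", 1), ("paladin", 1), ("warlock", 1), ("wizard", 2)] : List (String × Int)), y.1 = s ∧ (0 : Int) ≤ y.2 := by
            intro y hy
            have h := pv_mem_filterMap_suffix hy
            refine ⟨h.1, ?_⟩
            have h2 := h.2
            simp only [List.map_cons, List.map_nil, List.mem_cons, List.not_mem_nil, or_false] at h2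
            omega
          rw [hH, pv_case_hit s 0 _ _ ht hR]
          simp only [Bool.or_true, Bool.or_self, reduceIte]
          decide
        | false =>
          cases h4 : PySem.Str.isIn "sorcerer" (pvB_name cd) with
          | true =>
            have hH : pvB_classHits s cd = (s, (1 : Int)) :: (List.filterMap (fun kp => if PySem.Str.isIn kp.1 (pvB_name cd) then some (s, kp.2) else none) ([("bard", 1), ("paladin", 1), ("warlock", 1), ("wizard", 2)] : List (String × Int))) := by
              simp only [pvB_classHits, pvPriority, List.filterMap_cons, List.filterMap_nil, h1, h2, h3, h4, reduceIte, Bool.false_eq_true]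
            have ht : ∀ y ∈ List.filterMap (fun kp => if PySem.Str.isIn kp.1 (pvB_name cd) then some (s, kp.2) else none) ([("bard", 1), ("paladin", 1), ("warlock", 1), ("wizard", 2)] : List (String × Int)), y.1 = s ∧ (1 : Int) ≤ y.2 := by
              intro y hy
              have h := pv_mem_filterMap_suffix hy
              refine ⟨h.1, ?_⟩
              have h2 := h.2
              simp only [List.map_cons, List.map_nil, List.mem_cons, List.not_mem_nil, or_false] at h2
              omega
            rw [hH, pv_case_hit s 1 _ _ ht hR]
            simp only [Bool.true_or, Bool.or_self, reduceIte, Bool.false_eq_true]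
            decide
          | false =>
            cases h5 : PySem.Str.isIn "bard" (pvB_name cd) with
            | true =>
              have hH : pvB_classHits s cd = (s, (1 : Int)) :: (List.filterMap (fun kp => if PySem.Str.isIn kp.1 (pvB_name cd) then some (s, kp.2) else none) ([("paladin", 1), ("warlock", 1), ("wizard", 2)] : List (String × Int))) := by
                simp only [pvB_classHits, pvPriority, List.filterMap_cons, List.filterMap_nil, h1, h2, h3, h4, h5, reduceIte, Bool.false_eq_true]
              have ht : ∀ y ∈ List.filterMap (fun kp => if PySem.Str.isIn kp.1 (pvB_name cd) then some (s, kp.2) else none) ([("paladin", 1), ("warlock", 1), ("wizard", 2)] : List (String × Int)), y.1 = s ∧ (1 : Int) ≤ y.2 := by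
                intro y hy
                have h := pv_mem_filterMap_suffix hy
                refine ⟨h.1, ?_⟩
                have h2 := h.2
                simp only [List.map_cons, List.map_nil, List.mem_cons, List.not_mem_nil, or_false] at h2
                omega
              rw [hH, pv_case_hit s 1 _ _ ht hR]
              simp only [Bool.true_or, Bool.or_true, Bool.or_self, reduceIte, Bool.false_eq_true]
              decide
            | false =>
              cases h6 : PySem.Str.isIn "paladin" (pvB_name cd) with
              | true =>
                have hH : pvB_classHits s cd = (s, (1 : Int)) :: (List.filterMap (fun kp => if PySem.Str.isIn kp.1 (pvB_name cd) then some (s, kp.2) else none) ([("warlock", 1), ("wizard", 2)] : List (String × Int))) := by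
                  simp only [pvB_classHits, pvPriority, List.filterMap_cons, List.filterMap_nil, h1, h2, h3, h4, h5, h6, reduceIte, Bool.false_eq_true]
                have ht : ∀ y ∈ List.filterMap (fun kp => if PySem.Str.isIn kp.1 (pvB_name cd) then some (s, kp.2) else none) ([("warlock", 1), ("wizard", 2)] : List (String × Int)), y.1 = s ∧ (1 : Int) ≤ y.2 := by
                  intro y hy
                  have h := pv_mem_filterMap_suffix hy
                  refine ⟨h.1, ?_⟩
                  have h2 := h.2
                  simp only [List.map_cons, List.map_nil, List.mem_cons, List.not_mem_nil, or_false] at h2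
                  omega
                rw [hH, pv_case_hit s 1 _ _ ht hR]
                simp only [Bool.true_or, Bool.or_true, Bool.or_self, reduceIte, Bool.false_eq_true]
                decide
              | false =>
                cases h7 : PySem.Str.isIn "warlock" (pvB_name cd) with
                | true =>
                  have hH : pvB_classHits s cd = (s, (1 : Int)) :: (List.filterMap (fun kp => if PySem.Str.isIn kp.1 (pvB_name cd) then some (s, kp.2) else none) ([("wizard", 2)] : List (String × Int))) := by
                    simp only [pvB_classHits, pvPriority, List.filterMap_cons, List.filterMap_nil, h1, h2, h3, h4, h5, h6, h7, reduceIte, Bool.false_eq_true]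
                  have ht : ∀ y ∈ List.filterMap (fun kp => if PySem.Str.isIn kp.1 (pvB_name cd) then some (s, kp.2) else none) ([("wizard", 2)] : List (String × Int)), y.1 = s ∧ (1 : Int) ≤ y.2 := by
                    intro y hy
                    have h := pv_mem_filterMap_suffix hy
                    refine ⟨h.1, ?_⟩
                    have h2 := h.2
                    simp only [List.map_cons, List.map_nil, List.mem_cons, List.not_mem_nil, or_false] at h2
                    omega
                  rw [hH, pv_case_hit s 1 _ _ ht hR]
                  simp only [Bool.or_true, Bool.or_self, reduceIte, Bool.false_eq_true]
                  decide
                | false =>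
                  cases h8 : PySem.Str.isIn "wizard" (pvB_name cd) with
                  | true =>
                    have hH : pvB_classHits s cd = (s, (2 : Int)) :: (List.filterMap (fun kp => if PySem.Str.isIn kp.1 (pvB_name cd) then some (s, kp.2) else none) ([] : List (String × Int))) := by
                      simp only [pvB_classHits, pvPriority, List.filterMap_cons, List.filterMap_nil, h1, h2, h3, h4, h5, h6, h7, h8, reduceIte, Bool.false_eq_true]
                    have ht : ∀ y ∈ List.filterMap (fun kp => if PySem.Str.isIn kp.1 (pvB_name cd) then some (s, kp.2) else none) ([] : List (String × Int)), y.1 = s ∧ (2 : Int) ≤ y.2 := by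
                      intro y hy
                      simp at hy
                    rw [hH, pv_case_hit s 2 _ _ ht hR]
                    simp only [Bool.or_self, reduceIte, Bool.false_eq_true]
                    decide
                  | false =>
                    have hH : pvB_classHits s cd = [] := by
                      simp only [pvB_classHits, pvPriority, List.filterMap_cons, List.filterMap_nil, h1, h2, h3, h4, h5, h6, h7, h8, reduceIte, Bool.false_eq_true]
                    rw [hH, List.nil_append]
                    simp only [Bool.or_self, reduceIte, Bool.false_eq_true]
                    exact ih (s + 1)

-- ===== VERDICT (by name: the statement is the Claim_ definition above) =====
theorem get_primary_spellcasting_ability_py_spec : Claim_equal_get_primary_spellcasting_ability_py := by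
  intro character_data _
  unfold Spec_get_primary_spellcasting_ability_py get_primary_spellcasting_ability_py get_primary_spellcasting_ability_py_alt
  simp only [pv_min2_eq_foldl]
  exact pv_main _ 0
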